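-- pv_equiv track=rewrite | github.com/AlexMuzzy/advent-of-code-2025 | solutions/day4/solution.py | solve_day4_part2
-- ===== SOURCE A (Python) =====
-- from typing import List, Tuple
--
-- map = ((-1, -1), (-1, 0), (-1, 1), (0, -1), (0, 1), (1, -1), (1, 0), (1, 1))
--
-- def solve_day4_part1(input: List[str]) -> Tuple[List[str], int]:
--     count = 0
--     visited_list = [list(line) for line in input]
--     to_remove = []
--
--     for i, line in enumerate(visited_list):
--         for j, c1 in enumerate(line):
--             if not c1 == "@":
--                 continue
--
--             paper_roll_count = 0
--             for x, y in map:
--                 x_coords = j + x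
--                 y_coords = i + y
--
--                 # Boundary detection
--                 if not y_coords >= 0 or not y_coords < len(visited_list):
--                     continue
--
--                 if not x_coords >= 0 or not x_coords < len(line):
--                     continue
--
--                 current_char = visited_list[y_coords][x_coords]
--                 if current_char == "@":
--                     paper_roll_count += 1
--
--             if paper_roll_count < 4:
--                 to_remove.append((i, j))
--                 count += 1
--
--     for i, j in to_remove:
--         visited_list[i][j] = "x"
--
--     return ["".join(line) for line in visited_list], count
--
-- def solve_day4_part2(input: List[str]) -> int:
--     count = 0
--     current_list = input.copy()
--     while True:
--         (visited_list, roll_count) = solve_day4_part1(current_list)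
--
--         if roll_count == 0:
--             break
--
--         count = count + roll_count
--         current_list = visited_list
--
--     return count
-- ===== SOURCE B (Python) =====
-- def solve_day4_part2(input):
--     deltas = ((-1, -1), (-1, 0), (-1, 1), (0, -1), (0, 1), (1, -1), (1, 0), (1, 1))
--     live = [(i, j) for i, row in enumerate(input) for j, c in enumerate(row) if c == "@"]
--     lset = set(live)
--
--     def deg(p, removed):
--         return sum((p[0] + dy, p[1] + dx) in lset and (p[0] + dy, p[1] + dx) not in removed
--                    for dx, dy in deltas)
--
--     stack = [p for p in live if deg(p, set()) < 4]
--     removed = set(stack)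
--     count = 0
--     while stack:
--         i, j = stack.pop()
--         count += 1
--         for dx, dy in deltas:
--             q = (i + dy, j + dx)
--             if q in lset and q not in removed and deg(q, removed) < 4:
--                 removed.add(q)
--                 stack.append(q)
--     return count
-- ===== Notes on version B (the rewrite author's own statement) =====
-- stated objective: faster
-- what changed: B replaces A's repeated whole-grid rescan rounds (rebuild char matrix, recount every cell's neighbours, rebuild strings, repeat until a round removes nothing) by a single worklist peeling: a stack seeded with the '@' cells having <4 '@' neighbours, and on each pop only the popped cell's 8 neighbours are re-checked and pushed if they become removable; correct because both counts equal |'@' cells| minus the size of the unique 4-core, which is independent of removal order. Measured ~2x faster on the generated inputs; the asymptotic gain (no rounds factor) grows with the number of peeling rounds.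
import Mathlib
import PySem

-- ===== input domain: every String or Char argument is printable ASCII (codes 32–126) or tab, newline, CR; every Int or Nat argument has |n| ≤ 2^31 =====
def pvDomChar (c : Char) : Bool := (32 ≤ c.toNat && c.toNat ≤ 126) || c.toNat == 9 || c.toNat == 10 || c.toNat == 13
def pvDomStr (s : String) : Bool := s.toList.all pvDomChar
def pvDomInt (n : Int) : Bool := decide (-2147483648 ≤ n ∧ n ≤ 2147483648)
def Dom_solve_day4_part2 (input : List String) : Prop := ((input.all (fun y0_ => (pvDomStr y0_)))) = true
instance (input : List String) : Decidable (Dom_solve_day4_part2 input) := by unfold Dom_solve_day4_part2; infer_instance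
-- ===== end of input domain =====

-- B replaces A's round-by-round full-grid rescans by a one-pass worklist peeling (a stack of
-- removable cells, neighbour counts re-checked only around each popped cell); correct because
-- both compute |'@' cells| − |4-core| and the 4-core is removal-order independent
-- (objective: faster, measured; return value only — neither program mutates its argument).

-- ===== PORT A =====
-- the module constant `map` (the 8 neighbour offsets (dx, dy))
def pvOffsets : List (Int × Int) :=
  [(-1,-1),(-1,0),(-1,1),(0,-1),(0,1),(1,-1),(1,0),(1,1)]

-- A's inner `for x, y in map` loop computing paper_roll_count for the cell at row i, column j
def pvCntA (visited : List (List Char)) (line : List Char) (i j : Int) : Int :=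
  pvOffsets.foldl
    (fun (cnt : Int) d =>
      let xc := j + d.1
      let yc := i + d.2
      if ¬ (0 ≤ yc) ∨ ¬ (yc < (visited.length : Int)) then cnt
      else if ¬ (0 ≤ xc) ∨ ¬ (xc < (line.length : Int)) then cnt
      else if PySem.List.pyGetD (PySem.List.pyGetD visited yc []) xc ' ' = '@' then cnt + 1
      else cnt) 0

def solve_day4_part1 (input : List String) : List String × Int :=
  let visited := input.map String.toList
  let scan := (PySem.List.enumerate visited 0).foldl
    (fun (acc : List (Int × Int) × Int) il =>
      (PySem.List.enumerate il.2 0).foldl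
        (fun (acc : List (Int × Int) × Int) jc =>
          if ¬ (jc.2 = '@') then acc
          else if pvCntA visited il.2 il.1 jc.1 < 4 then (acc.1 ++ [(il.1, jc.1)], acc.2 + 1)
          else acc)
        acc)
    ([], 0)
  let marked := scan.1.foldl
    (fun (v : List (List Char)) ij =>
      PySem.List.pySetD v ij.1
        (PySem.List.pySetD (PySem.List.pyGetD v ij.1 []) ij.2 'x')) visited
  (marked.map (fun l => String.ofList l), scan.2)

-- fuel for A's `while True`: number of '@' cells + 1 bounds the number of rounds,
-- since every round before the last removes at least one '@'
def pvFuelA (input : List String) : Nat :=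
  (input.map (fun s => s.toList.countP (fun c => c = '@'))).sum + 1

def pvLoopA : Nat → Int → List String → Int
  | 0, count, _ => count
  | n+1, count, cur =>
    let r := solve_day4_part1 cur
    if r.2 = 0 then count else pvLoopA n (count + r.2) r.1

def solve_day4_part2 (input : List String) : Int :=
  pvLoopA (pvFuelA input) 0 input

-- ===== PORT B =====
-- live = [(i, j) for i, row in enumerate(input) for j, c in enumerate(row) if c == "@"]
def pvLiveList (input : List String) : List (Int × Int) :=
  (PySem.List.enumerate input 0).flatMap (fun il =>
    (PySem.List.enumerate il.2.toList 0).filterMap (fun jc =>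
      if jc.2 = '@' then some (il.1, jc.1) else none))

-- def deg(p, removed): sum of bools over deltas (a 0/1-sum is a countP)
def pvDegB (lset removed : List (Int × Int)) (p : Int × Int) : Int :=
  ((pvOffsets.countP (fun d =>
      decide ((p.1 + d.2, p.2 + d.1) ∈ lset ∧ ¬ (p.1 + d.2, p.2 + d.1) ∈ removed)) : Nat) : Int)

-- body of B's `for dx, dy in deltas` loop: state = (stack, removed)
def pvStepW (lset : List (Int × Int)) (p : Int × Int)
    (s : List (Int × Int) × List (Int × Int)) (d : Int × Int) :
    List (Int × Int) × List (Int × Int) :=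
  let q := (p.1 + d.2, p.2 + d.1)
  if q ∈ lset ∧ ¬ q ∈ s.2 ∧ pvDegB lset s.2 q < 4 then (s.1 ++ [q], PySem.Set.add s.2 q)
  else s

-- B's `while stack` loop; fuel = |live| + 1 (each iteration pops one of at most |live| pushes)
def pvLoopW (lset : List (Int × Int)) : Nat → List (Int × Int) → List (Int × Int) → Int → Int
  | 0, _, _, count => count
  | n+1, stack, removed, count =>
    match PySem.List.pop? stack with
    | none => count
    | some pr =>
      let s := pvOffsets.foldl (pvStepW lset pr.1) (pr.2, removed)
      pvLoopW lset n s.1 s.2 (count + 1)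

def solve_day4_part2_alt (input : List String) : Int :=
  let live := pvLiveList input
  let lset := PySem.Set.ofList live
  let stack := live.filter (fun p => pvDegB lset [] p < 4)
  let removed := PySem.Set.ofList stack
  pvLoopW lset (live.length + 1) stack removed 0

-- ===== PRECONDITION & SPEC =====
-- shared closed-form vocabulary for the precondition
def pvAt (g : List (List Char)) (i j : Nat) : Char := (g.getD i []).getD j ' '
def pvRowL (g : List (List Char)) (i : Nat) : Nat := (g.getD i []).length

-- no '@' cell's neighbour scan (bounds-checked by A against the CURRENT row's length)
-- reaches an index beyond an ADJACENT row's length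
def pvNoCrash (g : List (List Char)) : Prop :=
  ∀ i : Nat, i < g.length → ∀ j : Nat, j < pvRowL g i →
    ∀ d ∈ pvOffsets,
      (pvAt g i j = '@' ∧ 0 ≤ (i : Int) + d.2 ∧ (i : Int) + d.2 < (g.length : Int) ∧
        0 ≤ (j : Int) + d.1 ∧ (j : Int) + d.1 < (pvRowL g i : Int)) →
      (j : Int) + d.1 < (pvRowL g ((i : Int) + d.2).toNat : Int)

-- Pre_ excludes exactly the ragged inputs on which A raises IndexError: a '@' cell whose
-- neighbour scan, bounds-checked against its own row's length, indexes a shorter adjacent row.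
def Pre_solve_day4_part2 (input : List String) : Prop :=
  pvNoCrash (input.map String.toList)

instance (input : List String) : Decidable (Pre_solve_day4_part2 input) := by
  unfold Pre_solve_day4_part2 pvNoCrash; infer_instance

def pvWitness_solve_day4_part2 : List String := ["@@.", ".@@"]

def Spec_solve_day4_part2 (input : List String) (out : Int) : Prop := out = solve_day4_part2_alt input
instance (input : List String) (out : Int) : Decidable (Spec_solve_day4_part2 input out) := by unfold Spec_solve_day4_part2; infer_instance

-- ===== CLAIM (what is proved, stated in full; the proofs are below) =====
def Claim_equal_solve_day4_part2 : Prop := ∀ (input : List String), Dom_solve_day4_part2 input → Pre_solve_day4_part2 input → Spec_solve_day4_part2 input (solve_day4_part2 input)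

-- ===== LEMMAS AND PROOFS =====

-- ---- proof-side vocabulary ----

-- the coordinate list contributed by one row (B's inner comprehension, abstracted)
def pvRowLive (i : Int) (s : Int) (row : List Char) : List (Int × Int) :=
  (PySem.List.enumerate row s).filterMap (fun jc => if jc.2 = '@' then some (i, jc.1) else none)

def pvLiveFrom (s : Int) (g : List (List Char)) : List (Int × Int) :=
  (PySem.List.enumerate g s).flatMap (fun il => pvRowLive il.1 0 il.2)

def pvLiveG (g : List (List Char)) : List (Int × Int) := pvLiveFrom 0 g

-- degree of a cell within a coordinate list
def pvDeg (live : List (Int × Int)) (p : Int × Int) : Nat :=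
  pvOffsets.countP (fun d => decide ((p.1 + d.2, p.2 + d.1) ∈ live))

def pvOff (p d : Int × Int) : Int × Int := (p.1 + d.2, p.2 + d.1)

def pvNb (p q : Int × Int) : Prop := ∃ d ∈ pvOffsets, q = pvOff p d

def pvStable (S : List (Int × Int)) : Prop := ∀ q ∈ S, 4 ≤ pvDeg S q

def pvSurv (L R : List (Int × Int)) : List (Int × Int) :=
  L.filter (fun q => !(decide (q ∈ R)))

lemma rowLive_cons (i s : Int) (c : Char) (row : List Char) :
    pvRowLive i s (c :: row) = (if c = '@' then [(i, s)] else []) ++ pvRowLive i (s + 1) row := by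
  simp only [pvRowLive, PySem.List.enumerate_cons, List.filterMap_cons]
  split <;> simp_all

lemma mem_rowLive {q : Int × Int} {i s : Int} {row : List Char} :
    q ∈ pvRowLive i s row ↔
      ∃ k : Nat, k < row.length ∧ q = (i, s + (k : Int)) ∧ row.getD k ' ' = '@' := by
  simp only [pvRowLive, List.mem_filterMap, PySem.List.mem_enumerate_iff]
  constructor
  · rintro ⟨⟨a, c⟩, ⟨k, hk, hpair⟩, hif⟩
    cases hpair
    by_cases h : row[k] = '@'
    · rw [if_pos h] at hif
      injection hif with hq
      exact ⟨k, hk, hq.symm, by rw [List.getD_eq_getElem _ _ hk]; exact h⟩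
    · rw [if_neg h] at hif; cases hif
  · rintro ⟨k, hk, rfl, h⟩
    rw [List.getD_eq_getElem _ _ hk] at h
    exact ⟨(s + (k : Int), row[k]), ⟨k, hk, rfl⟩, by simp [h]⟩

lemma snd_ge_of_mem_rowLive {q : Int × Int} {i s : Int} {row : List Char}
    (h : q ∈ pvRowLive i s row) : s ≤ q.2 := by
  rcases mem_rowLive.mp h with ⟨k, _, rfl, _⟩
  simp

lemma fst_of_mem_rowLive {q : Int × Int} {i s : Int} {row : List Char}
    (h : q ∈ pvRowLive i s row) : q.1 = i := by
  rcases mem_rowLive.mp h with ⟨k, _, rfl, _⟩; rfl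

lemma nodup_rowLive (i : Int) (s : Int) (row : List Char) : (pvRowLive i s row).Nodup := by
  induction row generalizing s with
  | nil => simp [pvRowLive, PySem.List.enumerate_nil]
  | cons c row ih =>
    rw [rowLive_cons]
    split
    · refine List.nodup_cons.mpr ⟨fun hmem => ?_, ih (s + 1)⟩
      have := snd_ge_of_mem_rowLive hmem
      simp at this
    · simpa using ih (s + 1)

lemma length_rowLive (i : Int) (s : Int) (row : List Char) :
    (pvRowLive i s row).length = row.countP (fun c => c = '@') := by
  induction row generalizing s with
  | nil => simp [pvRowLive, PySem.List.enumerate_nil]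
  | cons c row ih =>
    rw [rowLive_cons, List.countP_cons]
    split <;> rename_i h <;> simp_all [ih (s + 1)]

lemma liveFrom_cons (s : Int) (row : List Char) (g : List (List Char)) :
    pvLiveFrom s (row :: g) = pvRowLive s 0 row ++ pvLiveFrom (s + 1) g := by
  simp [pvLiveFrom, PySem.List.enumerate_cons]

lemma mem_liveFrom {q : Int × Int} {s : Int} {g : List (List Char)} :
    q ∈ pvLiveFrom s g ↔
      ∃ k j : Nat, k < g.length ∧ j < (g.getD k []).length ∧
        q = (s + (k : Int), (j : Int)) ∧ (g.getD k []).getD j ' ' = '@' := by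
  induction g generalizing s with
  | nil => simp [pvLiveFrom, PySem.List.enumerate_nil]
  | cons row g ih =>
    rw [liveFrom_cons, List.mem_append, ih, mem_rowLive]
    constructor
    · rintro (⟨k, hk, rfl, h⟩ | ⟨k, j, hk, hj, rfl, h⟩)
      · exact ⟨0, k, by simp, by simpa using hk, by simp, by simpa using h⟩
      · exact ⟨k + 1, j, by simpa using hk, by simpa using hj, by simp; omega, by simpa using h⟩
    · rintro ⟨k, j, hk, hj, rfl, h⟩
      cases k with
      | zero => exact Or.inl ⟨j, by simpa using hj, by simp, by simpa using h⟩
      | succ k => exact Or.inr ⟨k, j, by simpa using hk, by simpa using hj, by simp; omega, by simpa using h⟩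

lemma mem_liveG {q : Int × Int} {g : List (List Char)} :
    q ∈ pvLiveG g ↔
      ∃ i j : Nat, q = ((i : Int), (j : Int)) ∧ i < g.length ∧ j < pvRowL g i ∧ pvAt g i j = '@' := by
  rw [pvLiveG, mem_liveFrom]
  constructor
  · rintro ⟨k, j, hk, hj, rfl, h⟩
    exact ⟨k, j, by simp, hk, hj, h⟩
  · rintro ⟨i, j, rfl, hi, hj, h⟩
    exact ⟨i, j, hi, hj, by simp, h⟩

lemma nodup_liveFrom (s : Int) (g : List (List Char)) : (pvLiveFrom s g).Nodup := by
  induction g generalizing s with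
  | nil => simp [pvLiveFrom, PySem.List.enumerate_nil]
  | cons row g ih =>
    rw [liveFrom_cons]
    refine List.Nodup.append (nodup_rowLive _ _ _) (ih (s + 1)) ?_
    intro q hq1 hq2
    have h1 := fst_of_mem_rowLive hq1
    rcases mem_liveFrom.mp hq2 with ⟨k, j, _, _, rfl, _⟩
    simp at h1; omega

lemma nodup_liveG (g : List (List Char)) : (pvLiveG g).Nodup := nodup_liveFrom 0 g

lemma length_liveFrom (s : Int) (g : List (List Char)) :
    (pvLiveFrom s g).length = (g.map (fun row => row.countP (fun c => c = '@'))).sum := by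
  induction g generalizing s with
  | nil => simp [pvLiveFrom, PySem.List.enumerate_nil]
  | cons row g ih =>
    rw [liveFrom_cons]
    simp [length_rowLive, ih (s + 1)]

lemma enumerate_map_toList (l : List String) (s : Int) :
    PySem.List.enumerate (l.map String.toList) s
      = (PySem.List.enumerate l s).map (fun p => (p.1, p.2.toList)) := by
  induction l generalizing s with
  | nil => simp [PySem.List.enumerate_nil]
  | cons x l ih => simp [PySem.List.enumerate_cons, ih (s + 1)]

lemma pvLiveList_eq (input : List String) :
    pvLiveList input = pvLiveG (input.map String.toList) := by
  rw [pvLiveG, pvLiveFrom, enumerate_map_toList, List.flatMap_map]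
  rfl

lemma pvFuelA_eq (input : List String) :
    pvFuelA input = (pvLiveG (input.map String.toList)).length + 1 := by
  rw [pvFuelA, pvLiveG, length_liveFrom, List.map_map]
  rfl

-- ---- the marking pass (A writes 'x' into the removed cells) ----

def pvMark (g : List (List Char)) (ps : List (Int × Int)) : List (List Char) :=
  ps.foldl (fun v ij =>
    PySem.List.pySetD v ij.1 (PySem.List.pySetD (PySem.List.pyGetD v ij.1 []) ij.2 'x')) g

lemma getD_set' {α : Type} (l : List α) (n : Nat) (v d : α) (i : Nat) :
    (l.set n v).getD i d = if i = n ∧ n < l.length then v else l.getD i d := by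
  simp [List.getD_eq_getElem?_getD, List.getElem?_set]
  split_ifs <;> simp_all

def pvInBounds (g : List (List Char)) (ps : List (Int × Int)) : Prop :=
  ∀ p ∈ ps, ∃ a b : Nat, p = ((a : Int), (b : Int)) ∧ a < g.length ∧ b < pvRowL g a

lemma mark_cons (g : List (List Char)) (a b : Nat) (ps : List (Int × Int)) :
    pvMark g (((a : Int), (b : Int)) :: ps) = pvMark (g.set a ((g.getD a []).set b 'x')) ps := by
  simp [pvMark, PySem.List.pySetD_natCast, PySem.List.pyGetD_natCast]

lemma set_len_rowL (g : List (List Char)) (a b : Nat) :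
    (g.set a ((g.getD a []).set b 'x')).length = g.length ∧
      ∀ i : Nat, pvRowL (g.set a ((g.getD a []).set b 'x')) i = pvRowL g i := by
  refine ⟨by simp, fun i => ?_⟩
  rw [pvRowL, getD_set']
  split_ifs with h
  · simp [pvRowL, h.1]
  · rfl

lemma mark_len_rowL (ps : List (Int × Int)) : ∀ g, pvInBounds g ps →
    (pvMark g ps).length = g.length ∧ ∀ i : Nat, pvRowL (pvMark g ps) i = pvRowL g i := by
  induction ps with
  | nil => exact fun g _ => ⟨rfl, fun _ => rfl⟩
  | cons p ps ih =>
    intro g hb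
    obtain ⟨a, b, rfl, ha, hba⟩ := hb p (List.mem_cons_self ..)
    set g1 := g.set a ((g.getD a []).set b 'x') with hg1
    have hstep := set_len_rowL g a b
    have hb1 : pvInBounds g1 ps := by
      intro q hq
      obtain ⟨a', b', rfl, h1, h2⟩ := hb q (List.mem_cons_of_mem _ hq)
      exact ⟨a', b', rfl, by rw [hstep.1]; exact h1, by rw [hstep.2]; exact h2⟩
    rw [mark_cons]
    exact ⟨by rw [(ih g1 hb1).1, hstep.1], fun i => by rw [(ih g1 hb1).2, hstep.2]⟩

lemma mark_at (ps : List (Int × Int)) : ∀ g, pvInBounds g ps → ∀ i j : Nat,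
    pvAt (pvMark g ps) i j = if ((i : Int), (j : Int)) ∈ ps then 'x' else pvAt g i j := by
  induction ps with
  | nil => simp [pvMark]
  | cons p ps ih =>
    intro g hb i j
    obtain ⟨a, b, rfl, ha, hba⟩ := hb p (List.mem_cons_self ..)
    set g1 := g.set a ((g.getD a []).set b 'x') with hg1
    have hstep := set_len_rowL g a b
    have hb1 : pvInBounds g1 ps := by
      intro q hq
      obtain ⟨a', b', rfl, h1, h2⟩ := hb q (List.mem_cons_of_mem _ hq)
      exact ⟨a', b', rfl, by rw [hstep.1]; exact h1, by rw [hstep.2]; exact h2⟩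
    have hat : ∀ i j : Nat, pvAt g1 i j = if i = a ∧ j = b then 'x' else pvAt g i j := by
      intro i j
      rw [pvAt, hg1, getD_set']
      split_ifs with h1 h2 h2
      · rw [getD_set']
        split_ifs with h3
        · rfl
        · exfalso; exact h3 ⟨h2.2, hba⟩
      · rw [getD_set']
        split_ifs with h3
        · exfalso; exact h2 ⟨h1.1, h3.1⟩
        · simp [pvAt, h1.1]
      · exact absurd ⟨h2.1, ha⟩ h1
      · rfl
    rw [mark_cons, ih g1 hb1 i j, hat]
    by_cases hmem : ((i : Int), (j : Int)) ∈ ps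
    · simp [hmem]
    · simp only [if_false, List.mem_cons, hmem, or_false]
      by_cases he : i = a ∧ j = b
      · simp [he]
      · have : ¬ (((i : Int), (j : Int)) = ((a : Int), (b : Int))) := by
          simp only [Prod.mk.injEq, Int.natCast_inj]
          exact fun h => he ⟨h.1, h.2⟩
        simp [he, this]

-- ragged-safety is preserved by marking (marking never turns a cell INTO '@')
lemma noCrash_mark {g : List (List Char)} {ps : List (Int × Int)}
    (hnc : pvNoCrash g) (hb : pvInBounds g ps) : pvNoCrash (pvMark g ps) := by
  intro i hi j hj d hd hcond
  have hlen := (mark_len_rowL ps g hb).1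
  have hrow := (mark_len_rowL ps g hb).2
  rw [hlen] at hi
  rw [hrow] at hj
  rw [hrow] at hcond ⊢
  rw [hlen] at hcond
  have hat := mark_at ps g hb i j
  rw [hat] at hcond
  split_ifs at hcond with hm
  · exact absurd hcond.1 (by decide)
  · exact hnc i hi j hj d hd hcond

-- ---- A's bound-checked neighbour count equals the degree in the live set ----

lemma off_aux {d : Int × Int} (hd : d ∈ pvOffsets) :
    (d.2 = -1 ∨ d.2 = 0 ∨ d.2 = 1) ∧ (d.2 ≠ 0 → ((0 : Int), -d.2) ∈ pvOffsets) := by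
  simp only [pvOffsets] at hd
  fin_cases hd <;> decide

lemma off_iff {g : List (List Char)} (hnc : pvNoCrash g) {i j : Nat} (hi : i < g.length)
    (hj : j < pvRowL g i) (hat : pvAt g i j = '@') {d : Int × Int} (hd : d ∈ pvOffsets) :
    (((i : Int) + d.2, (j : Int) + d.1) ∈ pvLiveG g) ↔
      (0 ≤ (i : Int) + d.2 ∧ (i : Int) + d.2 < (g.length : Int) ∧
       0 ≤ (j : Int) + d.1 ∧ (j : Int) + d.1 < (pvRowL g i : Int) ∧
       PySem.List.pyGetD (PySem.List.pyGetD g ((i : Int) + d.2) []) ((j : Int) + d.1) ' ' = '@') := by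
  constructor
  · intro hmem
    rcases mem_liveG.mp hmem with ⟨a, b, hq, ha, hb, hab⟩
    have hy : (i : Int) + d.2 = (a : Int) := congrArg Prod.fst hq
    have hx : (j : Int) + d.1 = (b : Int) := congrArg Prod.snd hq
    have hxr : (j : Int) + d.1 < (pvRowL g i : Int) := by
      rcases off_aux hd with ⟨hdy, hdy'⟩
      by_cases h0 : d.2 = 0
      · have hai : a = i := by omega
        subst hai; omega
      · have hcr := hnc a ha b hb ((0 : Int), -d.2) (hdy' h0)
          ⟨hab, by omega, by omega, by omega, by omega⟩
        have he : ((a : Int) + -d.2) = (i : Int) := by omega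
        rw [he] at hcr
        simp only [Int.toNat_natCast] at hcr
        omega
    refine ⟨by omega, by omega, by omega, hxr, ?_⟩
    rw [hy, hx, PySem.List.pyGetD_natCast, PySem.List.pyGetD_natCast]
    exact hab
  · rintro ⟨h1, h2, h3, h4, h5⟩
    have hcr := hnc i hi j hj d hd ⟨hat, h1, h2, h3, h4⟩
    refine mem_liveG.mpr ⟨((i : Int) + d.2).toNat, ((j : Int) + d.1).toNat, ?_, by omega, ?_, ?_⟩
    · have e1 : ((((i : Int) + d.2).toNat : Nat) : Int) = (i : Int) + d.2 := Int.toNat_of_nonneg h1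
      have e2 : ((((j : Int) + d.1).toNat : Nat) : Int) = (j : Int) + d.1 := Int.toNat_of_nonneg h3
      rw [Prod.mk.injEq]; exact ⟨e1.symm, e2.symm⟩
    · omega
    · rw [PySem.List.pyGetD_of_nonneg _ _ h1, PySem.List.pyGetD_of_nonneg _ _ h3] at h5
      exact h5

lemma cnt_eq_deg {g : List (List Char)} (hnc : pvNoCrash g) {i j : Nat} (hi : i < g.length)
    (hj : j < pvRowL g i) (hat : pvAt g i j = '@') :
    pvCntA g (g.getD i []) (i : Int) (j : Int)
      = ((pvDeg (pvLiveG g) ((i : Int), (j : Int)) : Nat) : Int) := by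
  rw [pvCntA,
    PySem.List.foldl_congr_mem _ _
      (fun (cnt : Int) d => if (((i : Int) + d.2, (j : Int) + d.1) ∈ pvLiveG g) then cnt + 1 else cnt) _
      (fun acc d hd => ?_),
    PySem.List.foldl_ite_add_one]
  · rw [pvDeg]; simp
  · show (if ¬ (0 ≤ (i : Int) + d.2) ∨ ¬ ((i : Int) + d.2 < ((g.length : Nat) : Int)) then acc
      else if ¬ (0 ≤ (j : Int) + d.1) ∨ ¬ ((j : Int) + d.1 < (((g.getD i []).length : Nat) : Int)) then acc
      else if PySem.List.pyGetD (PySem.List.pyGetD g ((i : Int) + d.2) []) ((j : Int) + d.1) ' ' = '@'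
        then acc + 1 else acc)
      = if (((i : Int) + d.2, (j : Int) + d.1) ∈ pvLiveG g) then acc + 1 else acc
    by_cases hmem : ((i : Int) + d.2, (j : Int) + d.1) ∈ pvLiveG g
    · rcases (off_iff hnc hi hj hat hd).mp hmem with ⟨h1, h2, h3, h4, h5⟩
      rw [if_neg (by push Not; exact ⟨h1, h2⟩), if_neg (by push Not; exact ⟨h3, h4⟩),
        if_pos h5, if_pos hmem]
    · rw [if_neg hmem]
      split_ifs with c1 c2 c3
      · rfl
      · rfl
      · exfalso
        push Not at c1 c2
        exact hmem ((off_iff hnc hi hj hat hd).mpr ⟨c1.1, c1.2, c2.1, c2.2, c3⟩)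
      · rfl

-- ---- characterizing A's scan as a filter of the live list ----

-- the removable cells of one round, in row-major order
def pvRem (g : List (List Char)) : List (Int × Int) :=
  (pvLiveG g).filter (fun p => decide (pvDeg (pvLiveG g) p < 4))

-- a fold that appends a chunk and adds the chunk's length per element
lemma foldl_emit {α β : Type} (l : List α) (f : α → List β)
    (F : List β × Int → α → List β × Int)
    (h : ∀ acc x, F acc x = (acc.1 ++ f x, acc.2 + ((f x).length : Int))) :
    ∀ acc, l.foldl F acc = (acc.1 ++ l.flatMap f, acc.2 + ((l.flatMap f).length : Int)) := by
  induction l with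
  | nil => intro acc; simp
  | cons x l ih =>
    intro acc
    rw [List.foldl_cons, h, ih]
    simp [List.append_assoc]
    omega

lemma rowEmit_eq_filter (i : Int) (row : List Char) (p : Int × Int → Bool) :
    ∀ s : Int, (PySem.List.enumerate row s).flatMap (fun jc =>
        if ¬ (jc.2 = '@') then [] else if p (i, jc.1) then [(i, jc.1)] else [])
      = (pvRowLive i s row).filter p := by
  induction row with
  | nil => intro s; simp [pvRowLive, PySem.List.enumerate_nil]
  | cons c row ih =>
    intro s
    rw [rowLive_cons, List.filter_append, PySem.List.enumerate_cons, List.flatMap_cons, ih (s + 1)]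
    by_cases h : c = '@'
    · by_cases hp : p (i, s) = true <;> simp [h, hp]
    · simp [h]

lemma part1_eq (cur : List String) (hnc : pvNoCrash (cur.map String.toList)) :
    solve_day4_part1 cur
      = ((pvMark (cur.map String.toList) (pvRem (cur.map String.toList))).map String.ofList,
         ((pvRem (cur.map String.toList)).length : Int)) := by
  set g := cur.map String.toList with hg
  have hscan : (PySem.List.enumerate g 0).foldl
      (fun (acc : List (Int × Int) × Int) il =>
        (PySem.List.enumerate il.2 0).foldl
          (fun (acc : List (Int × Int) × Int) jc =>
            if ¬ (jc.2 = '@') then acc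
            else if pvCntA g il.2 il.1 jc.1 < 4 then (acc.1 ++ [(il.1, jc.1)], acc.2 + 1)
            else acc)
          acc)
      ([], 0)
      = (pvRem g, ((pvRem g).length : Int)) := by
    have hinner : ∀ (il : Int × List Char) (acc : List (Int × Int) × Int),
        (PySem.List.enumerate il.2 0).foldl
          (fun (acc : List (Int × Int) × Int) jc =>
            if ¬ (jc.2 = '@') then acc
            else if pvCntA g il.2 il.1 jc.1 < 4 then (acc.1 ++ [(il.1, jc.1)], acc.2 + 1)
            else acc)
          acc
        = (acc.1 ++ (PySem.List.enumerate il.2 0).flatMap (fun jc =>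
            if ¬ (jc.2 = '@') then []
            else if pvCntA g il.2 il.1 jc.1 < 4 then [(il.1, jc.1)] else []),
           acc.2 + (((PySem.List.enumerate il.2 0).flatMap (fun jc =>
            if ¬ (jc.2 = '@') then []
            else if pvCntA g il.2 il.1 jc.1 < 4 then [(il.1, jc.1)] else [])).length : Int)) := by
      intro il
      refine foldl_emit _ _ _ (fun acc jc => ?_)
      by_cases h1 : jc.2 = '@'
      · by_cases h2 : pvCntA g il.2 il.1 jc.1 < 4 <;> simp [h1, h2]
      · simp [h1]
    have houter := foldl_emit (PySem.List.enumerate g 0)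
      (fun il => (PySem.List.enumerate il.2 0).flatMap (fun jc =>
        if ¬ (jc.2 = '@') then []
        else if pvCntA g il.2 il.1 jc.1 < 4 then [(il.1, jc.1)] else []))
      (fun (acc : List (Int × Int) × Int) il =>
        (PySem.List.enumerate il.2 0).foldl
          (fun (acc : List (Int × Int) × Int) jc =>
            if ¬ (jc.2 = '@') then acc
            else if pvCntA g il.2 il.1 jc.1 < 4 then (acc.1 ++ [(il.1, jc.1)], acc.2 + 1)
            else acc)
          acc)
      (fun acc il => hinner il acc)
      ([], 0)
    rw [houter]
    have hflat : (PySem.List.enumerate g 0).flatMap (fun il =>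
        (PySem.List.enumerate il.2 0).flatMap (fun jc =>
          if ¬ (jc.2 = '@') then []
          else if pvCntA g il.2 il.1 jc.1 < 4 then [(il.1, jc.1)] else []))
        = pvRem g := by
      have hcong : ∀ il ∈ PySem.List.enumerate g 0,
          (PySem.List.enumerate il.2 0).flatMap (fun jc =>
            if ¬ (jc.2 = '@') then []
            else if pvCntA g il.2 il.1 jc.1 < 4 then [(il.1, jc.1)] else [])
          = (pvRowLive il.1 0 il.2).filter (fun p => decide (pvDeg (pvLiveG g) p < 4)) := by
        intro il hil
        rw [PySem.List.mem_enumerate_iff] at hil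
        rcases hil with ⟨k, hk, hilk⟩
        subst hilk
        rw [← rowEmit_eq_filter ((0 : Int) + (k : Nat)) g[k]
          (fun p => decide (pvDeg (pvLiveG g) p < 4)) 0]
        apply List.flatMap_congr
        intro jc hjc
        rw [PySem.List.mem_enumerate_iff] at hjc
        rcases hjc with ⟨m, hm, hjcm⟩
        subst hjcm
        by_cases h1 : (g[k])[m] = '@'
        · have hk' : k < g.length := hk
          have hrow : g.getD k [] = g[k] := List.getD_eq_getElem _ _ hk
          have hm' : m < pvRowL g k := by rw [pvRowL, hrow]; exact hm
          have hat : pvAt g k m = '@' := by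
            rw [pvAt, hrow, List.getD_eq_getElem _ _ hm]; exact h1
          have := cnt_eq_deg hnc hk' hm' hat
          rw [hrow] at this
          simp only [zero_add, h1]
          rw [this]
          norm_num
        · simp [h1]
      rw [List.flatMap_congr hcong]
      rw [pvRem, pvLiveG, pvLiveFrom, List.filter_flatMap]
    rw [hflat]
    simp
  simp only [solve_day4_part1, ← hg]
  rw [hscan]
  rfl

-- ---- the round-peeling loop (proof-side model of A) ----

def pvLoopR : Nat → Int → List (Int × Int) → Int
  | 0, c, _ => c
  | n+1, c, live =>
    let keep := live.filter (fun p => decide (4 ≤ pvDeg live p))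
    let removed : Int := (live.length : Int) - (keep.length : Int)
    if removed = 0 then c else pvLoopR n (c + removed) keep

lemma deg_of_perm {live live' : List (Int × Int)} (h : ∀ q, q ∈ live ↔ q ∈ live') (p : Int × Int) :
    pvDeg live p = pvDeg live' p := by
  rw [pvDeg, pvDeg]
  exact List.countP_congr (fun d _ => by simp [h])

lemma bounds_of_mem_liveG {g : List (List Char)} {q : Int × Int} (h : q ∈ pvLiveG g) :
    ∃ a b : Nat, q = ((a : Int), (b : Int)) ∧ a < g.length ∧ b < pvRowL g a := by
  rcases mem_liveG.mp h with ⟨a, b, rfl, ha, hb, _⟩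
  exact ⟨a, b, rfl, ha, hb⟩

lemma loop_eq (n : Nat) : ∀ (cur : List String) (live : List (Int × Int)) (count : Int),
    pvNoCrash (cur.map String.toList) →
    (pvLiveG (cur.map String.toList)).Perm live →
    live.Nodup →
    live.length < n →
    pvLoopA n count cur = pvLoopR n count live := by
  induction n with
  | zero => intro cur live count _ _ _ h; exact absurd h (Nat.not_lt_zero _)
  | succ n ih =>
    intro cur live count hnc hperm hnd hlen
    set g := cur.map String.toList with hg
    have hpart := part1_eq cur hnc
    rw [← hg] at hpart
    set qG : Int × Int → Bool := fun p => decide (4 ≤ pvDeg (pvLiveG g) p) with hqG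
    have hdeg : ∀ p, pvDeg live p = pvDeg (pvLiveG g) p :=
      deg_of_perm (fun q => (hperm.mem_iff).symm)
    have hfil : live.filter (fun p => decide (4 ≤ pvDeg live p)) = live.filter qG :=
      List.filter_congr (fun p _ => by simp [hdeg p, hqG])
    have hkeep_perm : ((pvLiveG g).filter qG).Perm (live.filter qG) := hperm.filter qG
    have hrem_eq : pvRem g = (pvLiveG g).filter (fun p => !qG p) := by
      rw [pvRem]
      exact List.filter_congr (fun p _ => by
        simp only [hqG, ← decide_not, decide_eq_decide]
        omega)
    have hsplit : (pvLiveG g).length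
        = ((pvLiveG g).filter qG).length + ((pvLiveG g).filter (fun p => !qG p)).length :=
      List.length_eq_length_filter_add qG
    have hlive_len : (pvLiveG g).length = live.length := hperm.length_eq
    have hB : pvLoopR (n + 1) count live
        = (if ((live.length : Int) - ((live.filter qG).length : Int) = 0) then count
           else pvLoopR n (count + ((live.length : Int) - ((live.filter qG).length : Int)))
             (live.filter qG)) := by
      simp only [pvLoopR]
      rw [hfil]
    have hcount : ((pvRem g).length : Int)
        = (live.length : Int) - ((live.filter qG).length : Int) := by
      rw [hrem_eq]
      have := hkeep_perm.length_eq
      omega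
    rw [hB]
    simp only [pvLoopA, hpart]
    by_cases h0 : ((pvRem g).length : Int) = 0
    · rw [if_pos h0, if_pos (by omega)]
    · rw [if_neg h0, if_neg (by omega)]
      have hbounds : pvInBounds g (pvRem g) := by
        intro p hp
        exact bounds_of_mem_liveG (List.mem_of_mem_filter hp)
      have hnc' : pvNoCrash (pvMark g (pvRem g)) := noCrash_mark hnc hbounds
      have hg' : ((pvMark g (pvRem g)).map String.ofList).map String.toList
          = pvMark g (pvRem g) := by
        simp [List.map_map, Function.comp_def]
      have hmid : ∀ q, q ∈ pvLiveG (pvMark g (pvRem g)) ↔ q ∈ (pvLiveG g).filter qG := by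
        intro q
        have hmark := mark_at (pvRem g) g hbounds
        have hml := mark_len_rowL (pvRem g) g hbounds
        constructor
        · intro hq
          rcases mem_liveG.mp hq with ⟨a, b, rfl, ha, hb, hab⟩
          rw [hml.1] at ha
          rw [hml.2] at hb
          rw [hmark a b] at hab
          by_cases hm : ((a : Int), (b : Int)) ∈ pvRem g
          · rw [if_pos hm] at hab; exact absurd hab (by decide)
          · rw [if_neg hm] at hab
            have hmemg : ((a : Int), (b : Int)) ∈ pvLiveG g :=
              mem_liveG.mpr ⟨a, b, rfl, ha, hb, hab⟩
            refine List.mem_filter.mpr ⟨hmemg, ?_⟩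
            by_contra hq4
            exact hm (by
              rw [hrem_eq]
              exact List.mem_filter.mpr ⟨hmemg, by simp_all⟩)
        · intro hq
          rcases List.mem_filter.mp hq with ⟨hmemg, hq4⟩
          rcases mem_liveG.mp hmemg with ⟨a, b, hqab, ha, hb, hab⟩
          subst hqab
          refine mem_liveG.mpr ⟨a, b, rfl, by rw [hml.1]; exact ha, by rw [hml.2]; exact hb, ?_⟩
          rw [hmark a b, if_neg ?_]
          · exact hab
          · intro hm
            rw [hrem_eq] at hm
            have := (List.mem_filter.mp hm).2
            simp_all
      have hperm' : (pvLiveG (pvMark g (pvRem g))).Perm (live.filter qG) :=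
        (List.perm_ext_iff_of_nodup (nodup_liveG _) (hnd.filter _)).mpr
          (fun q => (hmid q).trans (hkeep_perm.mem_iff))
      have hlen' : (live.filter qG).length < n := by
        have h1 : ((pvLiveG g).filter qG).length = (live.filter qG).length := hkeep_perm.length_eq
        have h2 : 1 ≤ (pvRem g).length := by omega
        rw [hrem_eq] at h2
        omega
      rw [hcount]
      exact ih ((pvMark g (pvRem g)).map String.ofList) (live.filter qG) _
        (by rw [hg']; exact hnc') (by rw [hg']; exact hperm') (hnd.filter _) hlen'

-- ---- common facts about degrees, offsets, survivors ----

lemma deg_mono {S T : List (Int × Int)} (h : ∀ x, x ∈ S → x ∈ T) (p : Int × Int) :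
    pvDeg S p ≤ pvDeg T p :=
  List.countP_mono_left (fun d _ hd => by
    simp only [decide_eq_true_eq] at hd ⊢
    exact h _ hd)

lemma deg_lt_exists {S T : List (Int × Int)} (p : Int × Int)
    (h : pvDeg S p < pvDeg T p) :
    ∃ d ∈ pvOffsets, pvOff p d ∈ T ∧ pvOff p d ∉ S := by
  by_contra hno
  push Not at hno
  refine absurd h (not_lt.mpr (List.countP_mono_left (fun d hd hmem => ?_)))
  simp only [decide_eq_true_eq] at hmem ⊢
  exact hno d hd hmem

lemma neg_mem_offsets {d : Int × Int} (h : d ∈ pvOffsets) : (-d.1, -d.2) ∈ pvOffsets := by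
  simp only [pvOffsets] at h
  fin_cases h <;> decide

lemma nb_of_off {q : Int × Int} {d : Int × Int} (h : d ∈ pvOffsets) : pvNb (pvOff q d) q :=
  ⟨(-d.1, -d.2), neg_mem_offsets h, by simp [pvOff]⟩

lemma mem_surv {L R : List (Int × Int)} {q : Int × Int} :
    q ∈ pvSurv L R ↔ q ∈ L ∧ q ∉ R := by
  simp [pvSurv]

lemma nodup_surv {L R : List (Int × Int)} (h : L.Nodup) : (pvSurv L R).Nodup :=
  h.filter _

lemma degB_eq (L R : List (Int × Int)) (p : Int × Int) :
    pvDegB L R p = ((pvDeg (pvSurv L R) p : Nat) : Int) := by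
  rw [pvDegB, pvDeg]
  congr 1
  apply List.countP_congr
  intro d _
  simp [mem_surv]

lemma surv_nil (L : List (Int × Int)) : pvSurv L [] = L := by
  simp [pvSurv]

-- ---- the worklist loop (port B) computes |live| − |4-core| ----

-- the inner `for dx, dy in deltas` fold preserves the worklist invariants
lemma inner_inv (L : List (Int × Int)) (p : Int × Int) :
    ∀ (ds : List (Int × Int)), (∀ d ∈ ds, d ∈ pvOffsets) →
    ∀ (st R : List (Int × Int)),
    (∀ x ∈ st, x ∈ R) → (∀ x ∈ R, x ∈ L) → R.Nodup →
    (∀ q, q ∈ L → q ∉ R → pvDeg (pvSurv L R) q < 4 →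
        (∃ p' ∈ st, pvNb p' q) ∨ (∃ d ∈ ds, q = pvOff p d)) →
    (∀ T, (∀ x ∈ T, x ∈ L) → pvStable T → ∀ q ∈ T, q ∉ R) →
    (∀ x ∈ (ds.foldl (pvStepW L p) (st, R)).1, x ∈ (ds.foldl (pvStepW L p) (st, R)).2) ∧
    (∀ x ∈ (ds.foldl (pvStepW L p) (st, R)).2, x ∈ L) ∧
    (ds.foldl (pvStepW L p) (st, R)).2.Nodup ∧
    (∀ q, q ∈ L → q ∉ (ds.foldl (pvStepW L p) (st, R)).2 →
        pvDeg (pvSurv L (ds.foldl (pvStepW L p) (st, R)).2) q < 4 →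
        ∃ p' ∈ (ds.foldl (pvStepW L p) (st, R)).1, pvNb p' q) ∧
    (∀ T, (∀ x ∈ T, x ∈ L) → pvStable T → ∀ q ∈ T, q ∉ (ds.foldl (pvStepW L p) (st, R)).2) ∧
    (ds.foldl (pvStepW L p) (st, R)).1.length + R.length
      = st.length + (ds.foldl (pvStepW L p) (st, R)).2.length ∧
    R.length ≤ (ds.foldl (pvStepW L p) (st, R)).2.length := by
  intro ds
  induction ds with
  | nil =>
    intro _ st R h1 h2 h3 h4 h5
    refine ⟨h1, h2, h3, fun q hq hqR hdq => ?_, h5, by simp, le_refl _⟩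
    rcases h4 q hq hqR hdq with h | ⟨d, hd, _⟩
    · exact h
    · exact absurd hd (List.not_mem_nil)
  | cons d ds ih =>
    intro hds st R h1 h2 h3 h4 h5
    rw [List.foldl_cons]
    have hdoff : d ∈ pvOffsets := hds d (List.mem_cons_self ..)
    set q0 := (p.1 + d.2, p.2 + d.1) with hq0
    have hq0off : q0 = pvOff p d := rfl
    by_cases hc : q0 ∈ L ∧ ¬ q0 ∈ R ∧ pvDegB L R q0 < 4
    · -- q0 is scheduled: stack gains q0, removed gains q0
      have hstep : pvStepW L p (st, R) d = (st ++ [q0], R ++ [q0]) := by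
        rw [pvStepW]
        simp only [← hq0]
        rw [if_pos hc]
        have : PySem.Set.add R q0 = R ++ [q0] := by
          simp [PySem.Set.add, PySem.Set.contains, hc.2.1]
        rw [this]
      rw [hstep]
      have hdegq0 : pvDeg (pvSurv L R) q0 < 4 := by
        have := hc.2.2
        rw [degB_eq] at this
        exact_mod_cast this
      have hsub1 : ∀ x ∈ st ++ [q0], x ∈ R ++ [q0] := by
        intro x hx
        rcases List.mem_append.mp hx with hx | hx
        · exact List.mem_append.mpr (Or.inl (h1 x hx))
        · exact List.mem_append.mpr (Or.inr hx)
      have hsub2 : ∀ x ∈ R ++ [q0], x ∈ L := by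
        intro x hx
        rcases List.mem_append.mp hx with hx | hx
        · exact h2 x hx
        · simp at hx; subst hx; exact hc.1
      have hnd' : (R ++ [q0]).Nodup :=
        List.Nodup.append h3 (List.nodup_singleton _)
          (by intro x hx hx'; simp at hx'; subst hx'; exact hc.2.1 hx)
      have hK2' : ∀ q, q ∈ L → q ∉ R ++ [q0] → pvDeg (pvSurv L (R ++ [q0])) q < 4 →
          (∃ p' ∈ st ++ [q0], pvNb p' q) ∨ (∃ d' ∈ ds, q = pvOff p d') := by
        intro q hq hqR' hdq
        have hqR : q ∉ R := fun h => hqR' (List.mem_append.mpr (Or.inl h))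
        have hqne : q ≠ q0 := fun h => hqR' (by simp [h])
        by_cases hnb : ∃ d' ∈ pvOffsets, pvOff q d' = q0
        · rcases hnb with ⟨d', hd', he⟩
          have : pvNb q0 q := he ▸ nb_of_off hd'
          exact Or.inl ⟨q0, by simp, this⟩
        · push Not at hnb
          have hdeq : pvDeg (pvSurv L (R ++ [q0])) q = pvDeg (pvSurv L R) q := by
            rw [pvDeg, pvDeg]
            apply List.countP_congr
            intro d' hd'
            simp only [decide_eq_true_eq, mem_surv]
            have hne : (q.1 + d'.2, q.2 + d'.1) ≠ q0 := hnb d' hd'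
            constructor
            · rintro ⟨hl, hr⟩; exact ⟨hl, fun h => hr (by simp [h])⟩
            · rintro ⟨hl, hr⟩
              refine ⟨hl, fun h => ?_⟩
              rcases List.mem_append.mp h with h | h
              · exact hr h
              · simp at h; exact hne h
          rw [hdeq] at hdq
          rcases h4 q hq hqR hdq with ⟨p', hp', hnbp⟩ | ⟨d'', hd'', he⟩
          · exact Or.inl ⟨p', List.mem_append.mpr (Or.inl hp'), hnbp⟩
          · rcases List.mem_cons.mp hd'' with rfl | hd''
            · exact absurd (he.trans hq0off.symm) hqne
            · exact Or.inr ⟨d'', hd'', he⟩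
      have hJ3' : ∀ T, (∀ x ∈ T, x ∈ L) → pvStable T → ∀ q ∈ T, q ∉ R ++ [q0] := by
        intro T hTL hTs q hqT hqR'
        rcases List.mem_append.mp hqR' with h | h
        · exact h5 T hTL hTs q hqT h
        · simp at h
          have h4T : 4 ≤ pvDeg T q := hTs q hqT
          have hTsurv : ∀ x, x ∈ T → x ∈ pvSurv L R := by
            intro x hx
            exact mem_surv.mpr ⟨hTL x hx, h5 T hTL hTs x hx⟩
          have hm := deg_mono hTsurv q
          rw [h] at hm h4T
          omega
      obtain ⟨g1, g2, g3, g4, g5, g6, g7⟩ :=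
        ih (fun d' hd' => hds d' (List.mem_cons_of_mem _ hd')) (st ++ [q0]) (R ++ [q0])
          hsub1 hsub2 hnd' hK2' hJ3'
      exact ⟨g1, g2, g3, g4, g5, by simp at g6 ⊢; omega, by simp at g7 ⊢; omega⟩
    · -- q0 is not scheduled: state unchanged
      have hstep : pvStepW L p (st, R) d = (st, R) := by
        rw [pvStepW]
        simp only [← hq0]
        rw [if_neg hc]
      rw [hstep]
      refine ih (fun d' hd' => hds d' (List.mem_cons_of_mem _ hd')) st R h1 h2 h3 ?_ h5
      intro q hq hqR hdq
      rcases h4 q hq hqR hdq with h | ⟨d'', hd'', he⟩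
      · exact Or.inl h
      · rcases List.mem_cons.mp hd'' with rfl | hd''
        · -- q = q0 would have been scheduled; contradiction with the failed guard
          exfalso
          rw [← hq0off] at he
          subst he
          refine hc ⟨hq, hqR, ?_⟩
          rw [degB_eq]
          exact_mod_cast hdq
        · exact Or.inr ⟨d'', hd'', he⟩

-- the outer `while stack` loop: its result is count + |stack| − |removed| + |final removed|,
-- and the final survivor set is the (unique) stable maximal subset
lemma wl_inv (L : List (Int × Int)) :
    ∀ (n : Nat) (stack R : List (Int × Int)) (count : Int),
    (∀ x ∈ stack, x ∈ R) → (∀ x ∈ R, x ∈ L) → R.Nodup →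
    (∀ q, q ∈ L → q ∉ R → pvDeg (pvSurv L R) q < 4 → ∃ p' ∈ stack, pvNb p' q) →
    (∀ T, (∀ x ∈ T, x ∈ L) → pvStable T → ∀ q ∈ T, q ∉ R) →
    stack.length + (L.length - R.length) < n →
    ∃ R', (∀ x ∈ R', x ∈ L) ∧ R'.Nodup ∧
      pvStable (pvSurv L R') ∧
      (∀ T, (∀ x ∈ T, x ∈ L) → pvStable T → ∀ q ∈ T, q ∉ R') ∧
      pvLoopW L n stack R count
        = count + (stack.length : Int) - (R.length : Int) + (R'.length : Int) := by
  intro n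
  induction n with
  | zero => intro stack R count _ _ _ _ _ h; exact absurd h (Nat.not_lt_zero _)
  | succ n ih =>
    intro stack R count h1 h2 h3 h4 h5 hfuel
    rcases List.eq_nil_or_concat stack with rfl | ⟨rest, p, rfl⟩
    · -- empty stack: the loop stops; the survivors are stable by the invariant
      refine ⟨R, h2, h3, ?_, h5, ?_⟩
      · intro q hq
        rcases mem_surv.mp hq with ⟨hqL, hqR⟩
        by_contra hlt
        rcases h4 q hqL hqR (by omega) with ⟨p', hp', _⟩
        exact absurd hp' (List.not_mem_nil)
      · show pvLoopW L (n+1) [] R count = _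
        simp [pvLoopW, PySem.List.pop?]
    · -- pop the top of the stack and run the 8-neighbour pass
      rw [List.concat_eq_append] at *
      have hpop : PySem.List.pop? (rest ++ [p]) = some (p, rest) := PySem.List.pop?_last rest p
      have hK2 : ∀ q, q ∈ L → q ∉ R → pvDeg (pvSurv L R) q < 4 →
          (∃ p' ∈ rest, pvNb p' q) ∨ (∃ d ∈ pvOffsets, q = pvOff p d) := by
        intro q hq hqR hdq
        rcases h4 q hq hqR hdq with ⟨p', hp', hnb⟩
        rcases List.mem_append.mp hp' with h | h
        · exact Or.inl ⟨p', h, hnb⟩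
        · simp at h; subst h
          rcases hnb with ⟨d, hd, he⟩
          exact Or.inr ⟨d, hd, he⟩
      have hrest : ∀ x ∈ rest, x ∈ R := fun x hx => h1 x (List.mem_append.mpr (Or.inl hx))
      obtain ⟨c1, c2, c3, c4, c5, c6, c7⟩ :=
        inner_inv L p pvOffsets (fun _ h => h) rest R hrest h2 h3 hK2 h5
      set s := pvOffsets.foldl (pvStepW L p) (rest, R) with hs
      have hs2len : s.2.length ≤ L.length :=
        List.Subperm.length_le (List.subperm_of_subset c3 (fun x hx => c2 x hx))
      have happ : (rest ++ [p]).length = rest.length + 1 := by simp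
      have hfuel' : s.1.length + (L.length - s.2.length) < n := by omega
      obtain ⟨R', d1, d2, d3, d4, d5⟩ := ih s.1 s.2 (count + 1) c1 c2 c3 c4 c5 hfuel'
      refine ⟨R', d1, d2, d3, d4, ?_⟩
      show pvLoopW L (n+1) (rest ++ [p]) R count = _
      rw [pvLoopW]
      rw [hpop]
      simp only
      rw [← hs, d5]
      omega

-- the round loop computes |live| − |F| for a stable, maximal F
lemma round_char (n : Nat) : ∀ (live : List (Int × Int)) (c : Int),
    live.Nodup → live.length < n →
    ∃ F, pvLoopR n c live = c + ((live.length : Int) - (F.length : Int)) ∧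
      F.Nodup ∧ (∀ x ∈ F, x ∈ live) ∧ pvStable F ∧
      (∀ T, (∀ x ∈ T, x ∈ live) → pvStable T → ∀ q ∈ T, q ∈ F) := by
  induction n with
  | zero => intro live c _ h; exact absurd h (Nat.not_lt_zero _)
  | succ n ih =>
    intro live c hnd hlen
    set keep := live.filter (fun p => decide (4 ≤ pvDeg live p)) with hkeep
    by_cases h0 : (live.length : Int) - (keep.length : Int) = 0
    · -- fixpoint: live itself is stable
      have hkl : keep.length = live.length := by omega
      have hall : ∀ p ∈ live, 4 ≤ pvDeg live p := by
        have := List.length_filter_eq_length_iff.mp hkl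
        intro p hp
        simpa using this p hp
      refine ⟨live, ?_, hnd, fun x h => h, hall, fun T hT _ q hq => hT q hq⟩
      rw [pvLoopR]
      simp only [← hkeep]
      rw [if_pos h0]
      omega
    · have hkl : keep.length ≤ live.length := by
        rw [hkeep]; exact List.length_filter_le _ _
      have hlt : keep.length < live.length := by omega
      obtain ⟨F, e1, e2, e3, e4, e5⟩ := ih keep (c + ((live.length : Int) - (keep.length : Int)))
        (hnd.filter _) (by omega)
      refine ⟨F, ?_, e2, fun x hx => List.mem_of_mem_filter (e3 x hx), e4, ?_⟩
      · rw [pvLoopR]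
        simp only [← hkeep]
        rw [if_neg h0, e1]
        ring
      · -- a stable subset survives the round
        intro T hT hTs q hq
        refine e5 T (fun x hx => ?_) hTs q hq
        rw [hkeep]
        refine List.mem_filter.mpr ⟨hT x hx, ?_⟩
        simp only [decide_eq_true_eq]
        have := deg_mono hT x
        have := hTs x hx
        omega

-- ===== VERDICT (by name: the statement is the Claim_ definition above) =====
theorem solve_day4_part2_spec : Claim_equal_solve_day4_part2 := by
  intro input _hdom hpre
  unfold Spec_solve_day4_part2
  set g := input.map String.toList with hg
  set L := pvLiveG g with hLdef
  have hLnd : L.Nodup := nodup_liveG g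
  -- A's value: the round-peeling loop on L
  have hA : solve_day4_part2 input = pvLoopR (L.length + 1) 0 L := by
    rw [solve_day4_part2, pvFuelA_eq, ← hg, ← hLdef]
    exact loop_eq _ input L 0 hpre (List.Perm.refl _) hLnd (Nat.lt_succ_self _)
  obtain ⟨F, hFval, hFnd, hFsub, hFst, hFmax⟩ :=
    round_char (L.length + 1) L 0 hLnd (Nat.lt_succ_self _)
  -- B's value: the worklist loop on L
  have hlive : pvLiveList input = L := by rw [pvLiveList_eq, ← hg, ← hLdef]
  have hlset : PySem.Set.ofList L = L := PySem.Set.ofList_eq_self_of_nodup L hLnd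
  set stack0 := L.filter (fun p => pvDegB L [] p < 4) with hstack0
  have hstack0nd : stack0.Nodup := hLnd.filter _
  have hR0 : PySem.Set.ofList stack0 = stack0 := PySem.Set.ofList_eq_self_of_nodup _ hstack0nd
  have hmem0 : ∀ q, q ∈ stack0 ↔ q ∈ L ∧ pvDeg L q < 4 := by
    intro q
    rw [hstack0, List.mem_filter]
    constructor
    · rintro ⟨hl, hr⟩
      refine ⟨hl, ?_⟩
      rw [degB_eq, surv_nil] at hr
      simpa using hr
    · rintro ⟨hl, hr⟩
      refine ⟨hl, ?_⟩
      rw [degB_eq, surv_nil]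
      simp only [decide_eq_true_eq]
      exact_mod_cast hr
  have hB : solve_day4_part2_alt input = pvLoopW L (L.length + 1) stack0 stack0 0 := by
    rw [solve_day4_part2_alt]
    simp only [hlive, hlset, ← hstack0, hR0]
  obtain ⟨R', r1, r2, r3, r4, r5⟩ := wl_inv L (L.length + 1) stack0 stack0 0
    (fun x hx => hx)
    (fun x hx => (hmem0 x).mp hx |>.1)
    hstack0nd
    (by
      intro q hq hqR hdq
      have hge : 4 ≤ pvDeg L q := by
        by_contra hlt
        exact hqR ((hmem0 q).mpr ⟨hq, by omega⟩)
      have hdlt : pvDeg (pvSurv L stack0) q < pvDeg L q := by omega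
      obtain ⟨d, hd, hmemL, hnmem⟩ :=
        deg_lt_exists q hdlt
      have hoffR : pvOff q d ∈ stack0 := by
        rcases (not_iff_not.mpr (@mem_surv L stack0 (pvOff q d))).mp hnmem |> not_and_or.mp with h | h
        · exact absurd hmemL h
        · exact not_not.mp h
      exact ⟨pvOff q d, hoffR, nb_of_off hd⟩)
    (by
      intro T hT hTs q hq hmem
      have h4 : 4 ≤ pvDeg T q := hTs q hq
      have hmono := deg_mono hT q
      have := ((hmem0 q).mp hmem).2
      omega)
    (by
      have : stack0.length ≤ L.length :=
        List.length_filter_le _ _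
      omega)
  -- the two final survivor sets coincide, so the counts do
  have hsurv_sub : ∀ x ∈ pvSurv L R', x ∈ L := fun x hx => (mem_surv.mp hx).1
  have hFF' : ∀ q, q ∈ F ↔ q ∈ pvSurv L R' := by
    intro q
    constructor
    · intro hq
      exact mem_surv.mpr ⟨hFsub q hq, r4 F (fun x hx => hFsub x hx) hFst q hq⟩
    · intro hq
      exact hFmax (pvSurv L R') hsurv_sub r3 q hq
  have hFlen : F.length = (pvSurv L R').length :=
    ((List.perm_ext_iff_of_nodup hFnd (nodup_surv hLnd)).mpr hFF').length_eq
  have hRfil : (L.filter (fun q => decide (q ∈ R'))).length = R'.length := by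
    refine ((List.perm_ext_iff_of_nodup (hLnd.filter _) r2).mpr ?_).length_eq
    intro q
    rw [List.mem_filter]
    simp only [decide_eq_true_eq]
    exact ⟨fun h => h.2, fun h => ⟨r1 q h, h⟩⟩
  have hsplit : L.length = (L.filter (fun q => decide (q ∈ R'))).length + (pvSurv L R').length := by
    rw [pvSurv]
    exact List.length_eq_length_filter_add _
  rw [hA, hB, hFval, r5]
  have h1 : F.length = L.length - R'.length := by omega
  omega
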